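-- pv_equiv track=rewrite | github.com/qldrh112/qldrh112 | ssafy/algorithm/20240205/1221.py | gns
-- ===== SOURCE A (Python) =====
-- def gns(n, lst):
--     """
--     :param n: 언어 리스트의 길이
--     :param lst: 행성에서 사용하는 언어 리스트
--     :return: 정렬된 언어 리스트
--     """
--     sorted_lst = [0] * n
--     language_dict = {
--         'ZRO': 0,
--         'ONE': 1,
--         'TWO': 2,
--         'THR': 3,
--         'FOR': 4,
--         'FIV': 5,
--         'SIX': 6,
--         'SVN': 7,
--         'EGT': 8,
--         'NIN': 9,
--     }
--
--     counts = [0] * 10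
--     for i in range(n):
--         counts[language_dict[lst[i]]] += 1
--         lst[i] = language_dict[lst[i]]
--
--     for i in range(1, 10):
--         counts[i] += counts[i-1]
--
--     for i in range(n-1, -1, -1):
--         # 원본 데이터의 누적합 리스트에서 하나 줄이고
--         counts[lst[i]] -= 1
--         # 정렬된 리스트에 원본 데이터를 누적합 리스트의 위치에 넣는다.
--         sorted_lst[counts[lst[i]]] = lst[i]
--
--     # 리스트를 순회하며 language딕셔너리의 value와 일치하는 것은 key로 변경합니다.
--     for i in range(n):
--         for key, value in language_dict.items():
--             if sorted_lst[i] == value: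
--                 sorted_lst[i] = key
--
--     return sorted_lst
-- ===== SOURCE B (Python) =====
-- def gns(n, lst):
--     """Same task as A: sort the first n number-words; mutates lst[:n] to digits like A does.
--     Library comparison sort of the converted prefix instead of a hand-written counting sort."""
--     language_dict = {
--         'ZRO': 0, 'ONE': 1, 'TWO': 2, 'THR': 3, 'FOR': 4,
--         'FIV': 5, 'SIX': 6, 'SVN': 7, 'EGT': 8, 'NIN': 9,
--     }
--     inverse_dict = {value: key for key, value in language_dict.items()}
--     prefix = []
--     for i in range(n):
--         lst[i] = language_dict[lst[i]]
--         prefix.append(lst[i])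
--     return [inverse_dict[v] for v in sorted(prefix)]
-- ===== Notes on version B (the rewrite author's own statement) =====
-- stated objective: simpler
-- what changed: Replaces the hand-written counting sort (count array, prefix sums, backward scatter, value-to-word scan over dict items) with a library comparison sort of the converted prefix plus an inverse-dict lookup, keeping the same in-place mutation of lst[:n].
import Mathlib
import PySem

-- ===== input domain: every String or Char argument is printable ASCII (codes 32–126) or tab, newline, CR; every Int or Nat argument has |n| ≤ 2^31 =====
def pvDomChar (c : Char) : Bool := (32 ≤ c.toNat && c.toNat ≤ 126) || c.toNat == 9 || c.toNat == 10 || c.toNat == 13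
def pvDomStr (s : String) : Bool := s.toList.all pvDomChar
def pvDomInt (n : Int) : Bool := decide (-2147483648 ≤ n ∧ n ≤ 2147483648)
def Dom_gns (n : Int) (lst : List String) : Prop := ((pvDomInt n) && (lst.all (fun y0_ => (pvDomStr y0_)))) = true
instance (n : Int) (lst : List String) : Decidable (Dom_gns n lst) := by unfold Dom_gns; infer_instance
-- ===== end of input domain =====

-- B replaces A's hand-written counting sort by a library comparison sort + inverse-dict lookup
-- (objective: simpler). Both Pythons mutate lst[:n] to digits identically; the equivalence proved
-- here is about the return value only.

-- ===== PORT A =====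
-- Python list cells hold a str or an int during A's run; modelled by this sum type.
inductive PyVal where
  | s : String → PyVal
  | i : Int → PyVal
deriving DecidableEq, Repr

def langItems : List (String × Int) :=
  [("ZRO", 0), ("ONE", 1), ("TWO", 2), ("THR", 3), ("FOR", 4),
   ("FIV", 5), ("SIX", 6), ("SVN", 7), ("EGT", 8), ("NIN", 9)]

def langDict : PySem.Dict String Int := PySem.Dict.ofList langItems

-- language_dict[lst[i]] : KeyError (missing word / int cell) is excluded by Pre_gns, default 0
def cellKey (c : PyVal) : Int :=
  match c with
  | .s w => langDict.getD w 0
  | .i _ => 0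

-- lst[i] used as an index in loop 3: always an int cell there under Pre_gns
def cellInt (c : PyVal) : Int :=
  match c with
  | .i k => k
  | .s _ => 0

-- the returned cells: all strings under Pre_gns (exact there)
def cellStr (c : PyVal) : String :=
  match c with
  | .s w => w
  | .i _ => ""

def gns (n : Int) (lst : List String) : List String :=
  -- sorted_lst = [0] * n ; counts = [0] * 10
  let sorted0 : List PyVal := List.replicate n.toNat (PyVal.i 0)
  let counts0 : List Int := List.replicate 10 0
  -- for i in range(n): counts[language_dict[lst[i]]] += 1 ; lst[i] = language_dict[lst[i]]
  let st1 := (PySem.List.pyRange 0 n 1).foldl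
      (fun (st : List Int × List PyVal) i =>
        let v := cellKey (PySem.List.pyGetD st.2 i (PyVal.s ""))
        (PySem.List.pySetD st.1 v (PySem.List.pyGetD st.1 v 0 + 1),
         PySem.List.pySetD st.2 i (PyVal.i v)))
      (counts0, lst.map PyVal.s)
  -- for i in range(1, 10): counts[i] += counts[i-1]
  let counts1 := (PySem.List.pyRange 1 10 1).foldl
      (fun c i => PySem.List.pySetD c i (PySem.List.pyGetD c i 0 + PySem.List.pyGetD c (i - 1) 0))
      st1.1
  -- for i in range(n-1, -1, -1): counts[lst[i]] -= 1 ; sorted_lst[counts[lst[i]]] = lst[i]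
  let st3 := (PySem.List.pyRange (n - 1) (-1) (-1)).foldl
      (fun (st : List Int × List PyVal) i =>
        let v := cellInt (PySem.List.pyGetD st1.2 i (PyVal.i 0))
        let c' := PySem.List.pySetD st.1 v (PySem.List.pyGetD st.1 v 0 - 1)
        (c', PySem.List.pySetD st.2 (PySem.List.pyGetD c' v 0) (PyVal.i v)))
      (counts1, sorted0)
  -- for i in range(n): for key, value in language_dict.items(): if sorted_lst[i] == value: sorted_lst[i] = key
  let final := (PySem.List.pyRange 0 n 1).foldl
      (fun (sl : List PyVal) i =>
        langDict.items.foldl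
          (fun sl kv =>
            if PySem.List.pyGetD sl i (PyVal.i 0) = PyVal.i kv.2
            then PySem.List.pySetD sl i (PyVal.s kv.1) else sl)
          sl)
      st3.2
  final.map cellStr

-- ===== PORT B =====
def invDict : PySem.Dict Int String :=
  PySem.Dict.ofList (langItems.map (fun kv => (kv.2, kv.1)))

def gns_alt (n : Int) (lst : List String) : List String :=
  -- for i in range(n): lst[i] = language_dict[lst[i]]; prefix.append(lst[i])
  -- (slot i is read before it is written, and prefix.append reads the value just written,
  -- so the accumulated prefix is the dict image of lst's first n slots, read from lst)
  let pfx : List Int := (PySem.List.pyRange 0 n 1).foldl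
      (fun acc i => acc ++ [langDict.getD (PySem.List.pyGetD lst i "") 0]) []
  -- [inverse_dict[v] for v in sorted(prefix)]
  (PySem.List.sorted pfx (fun x => x) false).map (fun v => invDict.getD v "")

-- ===== PRECONDITION & SPEC =====
def langWords : List String :=
  ["ZRO", "ONE", "TWO", "THR", "FOR", "FIV", "SIX", "SVN", "EGT", "NIN"]

-- Pre_ excludes exactly the inputs where A raises: n > len(lst) (IndexError) and unknown
-- words among the first n elements (KeyError); for n ≤ 0 both programs return [].
def Pre_gns (n : Int) (lst : List String) : Prop :=
  n ≤ (lst.length : Int) ∧ ∀ s ∈ lst.take n.toNat, s ∈ langWords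
instance (n : Int) (lst : List String) : Decidable (Pre_gns n lst) := by
  unfold Pre_gns; infer_instance

def pvWitness_gns : Int × List String := (3, ["TWO", "ZRO", "NIN", "ONE"])

def Spec_gns (n : Int) (lst : List String) (out : List String) : Prop := out = gns_alt n lst
instance (n : Int) (lst : List String) (out : List String) : Decidable (Spec_gns n lst out) := by
  unfold Spec_gns; infer_instance

-- ===== CLAIM (what is proved, stated in full; the proofs are below) =====
def Claim_equal_gns : Prop :=
  ∀ (n : Int) (lst : List String), Dom_gns n lst → Pre_gns n lst → Spec_gns n lst (gns n lst)

-- ===== LEMMAS AND PROOFS =====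

-- ----- model definitions (proof helpers) -----
def toVal (s : String) : Int := langDict.getD s 0

def cntF (vs : List Int) (k : Nat) : Nat := vs.count (k : Int)

def SN (vs : List Int) (v : Nat) : Nat := ∑ u ∈ Finset.range v, cntF vs u

def canon (vs : List Int) : Nat → List Int
  | 0 => []
  | v + 1 => canon vs v ++ List.replicate (cntF vs v) ((v : Nat) : Int)

def wordOf (v : Nat) : String := langWords.getD v ""

def conv (c : PyVal) : PyVal :=
  langDict.items.foldl (fun c kv => if c = PyVal.i kv.2 then PyVal.s kv.1 else c) c

def applyCounts (c : List Int) (xs : List Int) : List Int :=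
  xs.foldl (fun c v => PySem.List.pySetD c v (PySem.List.pyGetD c v 0 + 1)) c

-- ----- arithmetic of the block structure -----
lemma SN_succ (vs : List Int) (v : Nat) : SN vs (v + 1) = SN vs v + cntF vs v :=
  Finset.sum_range_succ _ _

lemma SN_mono (vs : List Int) {v w : Nat} (h : v ≤ w) : SN vs v ≤ SN vs w :=
  Finset.sum_le_sum_of_subset (by intro x hx; simp only [Finset.mem_range] at *; omega)

lemma length_canon (vs : List Int) (V : Nat) : (canon vs V).length = SN vs V := by
  induction V with
  | zero => simp [canon, SN]
  | succ W ih => simp [canon, ih, SN_succ]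

lemma mem_canon (vs : List Int) (V : Nat) (x : Int) (h : x ∈ canon vs V) :
    ∃ u : Nat, u < V ∧ x = (u : Int) := by
  induction V with
  | zero => simp [canon] at h
  | succ W ih =>
    simp only [canon, List.mem_append] at h
    rcases h with h | h
    · obtain ⟨u, hu, rfl⟩ := ih h
      exact ⟨u, by omega, rfl⟩
    · exact ⟨W, by omega, (List.eq_of_mem_replicate h)⟩

lemma getElem?_canon (vs : List Int) {V v j : Nat} (hv : v < V) (hj : j < cntF vs v) :
    (canon vs V)[SN vs v + j]? = some ((v : Nat) : Int) := by
  induction V with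
  | zero => omega
  | succ W ih =>
    by_cases hvW : v = W
    · subst hvW
      rw [canon, List.getElem?_append_right (by rw [length_canon]; exact Nat.le_add_right _ _)]
      rw [length_canon]
      simp [hj]
    · have hvW' : v < W := by omega
      rw [canon, List.getElem?_append_left (by
        rw [length_canon]
        calc SN vs v + j < SN vs v + cntF vs v := by omega
          _ = SN vs (v + 1) := (SN_succ vs v).symm
          _ ≤ SN vs W := SN_mono vs (by omega))]
      exact ih hvW'

lemma pairwise_canon (vs : List Int) (V : Nat) : (canon vs V).Pairwise (· ≤ ·) := by
  induction V with
  | zero => simp [canon]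
  | succ W ih =>
    rw [canon, List.pairwise_append]
    refine ⟨ih, List.pairwise_replicate.2 (by simp), ?_⟩
    intro a ha b hb
    obtain ⟨u, hu, rfl⟩ := mem_canon vs W a ha
    have := List.eq_of_mem_replicate hb
    subst this
    exact_mod_cast Nat.le_of_lt hu

lemma count_canon_eq_zero (vs : List Int) (V : Nat) (a : Int)
    (h : ∀ u : Nat, u < V → a ≠ (u : Int)) : (canon vs V).count a = 0 := by
  rw [List.count_eq_zero]
  intro hmem
  obtain ⟨u, hu, rfl⟩ := mem_canon vs V _ hmem
  exact h u hu rfl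

lemma count_canon_of_lt (vs : List Int) {V k : Nat} (hk : k < V) :
    (canon vs V).count ((k : Nat) : Int) = cntF vs k := by
  induction V with
  | zero => omega
  | succ W ih =>
    rw [canon, List.count_append, List.count_replicate]
    by_cases hkW : k = W
    · subst hkW
      have hz : (canon vs k).count ((k : Nat) : Int) = 0 := by
        apply count_canon_eq_zero
        intro u hu he
        have : k = u := by exact_mod_cast he
        omega
      simp [hz]
    · have hlt : k < W := by omega
      rw [ih hlt]
      have hne : (((W : Nat) : Int) == ((k : Nat) : Int)) = false := by
        simp only [beq_eq_false_iff_ne, ne_eq, Int.natCast_inj]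
        omega
      simp [hne]

lemma perm_canon (vs : List Int) (hall : ∀ x ∈ vs, 0 ≤ x ∧ x < 10) :
    (canon vs 10).Perm vs := by
  rw [List.perm_iff_count]
  intro a
  by_cases h : ∃ u : Nat, u < 10 ∧ a = (u : Int)
  · obtain ⟨u, hu, rfl⟩ := h
    rw [count_canon_of_lt vs hu]
    rfl
  · push Not at h
    rw [count_canon_eq_zero vs 10 a h, Eq.comm, List.count_eq_zero]
    intro hmem
    obtain ⟨h0, h10⟩ := hall a hmem
    exact h a.toNat (by omega) (by omega)

lemma SN_total (vs : List Int) (hall : ∀ x ∈ vs, 0 ≤ x ∧ x < 10) :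
    SN vs 10 = vs.length := by
  have := (perm_canon vs hall).length_eq
  rw [length_canon] at this
  exact this

lemma cover (vs : List Int) (V : Nat) :
    ∀ p, p < SN vs V → ∃ v, v < V ∧ ∃ j, j < cntF vs v ∧ p = SN vs v + j := by
  induction V with
  | zero => intro p hp; simp [SN] at hp
  | succ W ih =>
    intro p hp
    rw [SN_succ] at hp
    by_cases h : p < SN vs W
    · obtain ⟨v, hv, j, hj, rfl⟩ := ih p h
      exact ⟨v, by omega, j, hj, rfl⟩
    · exact ⟨W, by omega, p - SN vs W, by omega, by omega⟩

-- ----- generic list helpers -----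
lemma getD_append_length {α : Type} (pre : List α) (y : α) (ys : List α) (d : α) :
    (pre ++ y :: ys).getD pre.length d = y := by
  rw [List.getD_eq_getElem?_getD, List.getElem?_append_right (le_refl pre.length)]
  simp

lemma set_append_length {α : Type} (pre : List α) (y z : α) (ys : List α) :
    (pre ++ y :: ys).set pre.length z = pre ++ z :: ys := by
  induction pre with
  | nil => simp
  | cons a p ih => simp [ih]

lemma getD_set {α : Type} (l : List α) (i k : Nat) (a d : α) :
    (l.set i a).getD k d = if k = i ∧ i < l.length then a else l.getD k d := by
  rw [List.getD_eq_getElem?_getD, List.getD_eq_getElem?_getD, List.getElem?_set]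
  by_cases h1 : i = k
  · subst h1
    by_cases h2 : i < l.length
    · simp [h2]
    · have hnone : l[i]? = none := List.getElem?_eq_none (by omega)
      simp [h2]
  · have hne : ¬(k = i ∧ i < l.length) := fun h => h1 h.1.symm
    rw [if_neg hne, if_neg h1]


-- ----- loop 1: counting + in-place conversion -----
lemma applyCounts_length (xs : List Int) : ∀ c : List Int, (applyCounts c xs).length = c.length := by
  induction xs with
  | nil => intro c; rfl
  | cons v t ih =>
    intro c
    simp only [applyCounts, List.foldl_cons] at *
    rw [ih]
    simp [PySem.List.length_pySetD]

lemma applyCounts_getD (xs : List Int) :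
    ∀ c : List Int, c.length = 10 → (∀ v ∈ xs, 0 ≤ v ∧ v < 10) → ∀ k : Nat, k < 10 →
      (applyCounts c xs).getD k 0 = c.getD k 0 + ((xs.count ((k : Nat) : Int) : Nat) : Int) := by
  induction xs with
  | nil => intro c _ _ k _; simp [applyCounts]
  | cons v t ih =>
    intro c hc h k hk
    obtain ⟨hv0, hv10⟩ := h v (List.mem_cons_self)
    simp only [applyCounts, List.foldl_cons] at *
    rw [PySem.List.pySetD_of_nonneg _ _ hv0]
    rw [ih _ (by simp [hc]) (fun x hx => h x (List.mem_cons_of_mem _ hx)) k hk]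
    rw [getD_set]
    by_cases he : v = (k : Int)
    · have hkt : k = v.toNat := by omega
      rw [if_pos ⟨hkt, by omega⟩]
      have hg : PySem.List.pyGetD c v 0 = c.getD k 0 := by
        rw [he, PySem.List.pyGetD_natCast]
      rw [hg, List.count_cons, if_pos (by exact beq_iff_eq.2 he)]
      push_cast
      ring
    · have hne : ¬(k = v.toNat ∧ v.toNat < c.length) := by
        rintro ⟨rfl, -⟩
        exact he (by omega)
      rw [if_neg hne, List.count_cons, if_neg (by simp only [beq_iff_eq]; exact he)]
      simp

lemma loop1_spec (rest : List String) :
    ∀ (todo : List String) (done : List Int) (counts : List Int) (a b : Int),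
      a = (done.length : Int) → b = a + (todo.length : Int) →
      (PySem.List.pyRange a b 1).foldl
        (fun (st : List Int × List PyVal) i =>
          (PySem.List.pySetD st.1 (cellKey (PySem.List.pyGetD st.2 i (PyVal.s "")))
            (PySem.List.pyGetD st.1 (cellKey (PySem.List.pyGetD st.2 i (PyVal.s ""))) 0 + 1),
           PySem.List.pySetD st.2 i (PyVal.i (cellKey (PySem.List.pyGetD st.2 i (PyVal.s ""))))))
        (counts, done.map PyVal.i ++ (todo ++ rest).map PyVal.s)
      = (applyCounts counts (todo.map toVal),
         (done ++ todo.map toVal).map PyVal.i ++ rest.map PyVal.s) := by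
  intro todo
  induction todo with
  | nil =>
    intro done counts a b ha hb
    simp only [List.length_nil, Nat.cast_zero, add_zero] at hb
    rw [PySem.List.pyRange_one_eq_nil (by omega)]
    simp [applyCounts]
  | cons w t ih =>
    intro done counts a b ha hb
    subst ha
    rw [PySem.List.pyRange_one_cons (by push_cast [hb, List.length_cons]; omega)]
    simp only [List.foldl_cons]
    have hlenmap : (done.map PyVal.i).length = done.length := by simp
    have hread : PySem.List.pyGetD
        (done.map PyVal.i ++ ((w :: t) ++ rest).map PyVal.s) ((done.length : Nat) : Int) (PyVal.s "")
        = PyVal.s w := by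
      rw [PySem.List.pyGetD_natCast]
      rw [show ((w :: t) ++ rest).map PyVal.s = PyVal.s w :: (t ++ rest).map PyVal.s by simp]
      rw [← hlenmap, getD_append_length]
    rw [hread]
    have hkey : cellKey (PyVal.s w) = toVal w := rfl
    rw [hkey]
    rw [PySem.List.pySetD_natCast]
    rw [show ((w :: t) ++ rest).map PyVal.s = PyVal.s w :: (t ++ rest).map PyVal.s by simp]
    rw [← hlenmap, set_append_length, hlenmap]
    rw [show done.map PyVal.i ++ PyVal.i (toVal w) :: (t ++ rest).map PyVal.s
        = (done ++ [toVal w]).map PyVal.i ++ (t ++ rest).map PyVal.s by simp]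
    rw [ih (done ++ [toVal w])
        (PySem.List.pySetD counts (toVal w) (PySem.List.pyGetD counts (toVal w) 0 + 1))
        ((done.length : Int) + 1) b (by simp) (by push_cast [hb, List.length_cons]; omega)]
    simp [applyCounts, List.append_assoc]

-- ----- loop 2: prefix sums -----
lemma loop2_spec : ∀ (V : Nat), V ≤ 10 →
    ∀ c : List Int, c.length = 10 →
      ((PySem.List.pyRange 1 ((V : Nat) : Int) 1).foldl
        (fun c i => PySem.List.pySetD c i
          (PySem.List.pyGetD c i 0 + PySem.List.pyGetD c (i - 1) 0)) c).length = 10 ∧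
      ∀ k : Nat, k < 10 →
        ((PySem.List.pyRange 1 ((V : Nat) : Int) 1).foldl
          (fun c i => PySem.List.pySetD c i
            (PySem.List.pyGetD c i 0 + PySem.List.pyGetD c (i - 1) 0)) c).getD k 0
        = if k < V then ∑ u ∈ Finset.range (k + 1), c.getD u 0 else c.getD k 0 := by
  intro V
  induction V with
  | zero =>
    intro _ c hc
    rw [PySem.List.pyRange_one_eq_nil (by omega)]
    exact ⟨hc, fun k hk => by simp⟩
  | succ W ih =>
    intro hV c hc
    by_cases hW : W = 0
    · subst hW
      rw [PySem.List.pyRange_one_eq_nil (by omega)]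
      refine ⟨hc, fun k hk => ?_⟩
      by_cases h : k < 0 + 1
      · have hk0 : k = 0 := by omega
        subst hk0
        simp
      · rw [List.foldl_nil, if_neg h]
    · obtain ⟨hlen, hget⟩ := ih (by omega) c hc
      rw [show ((W + 1 : Nat) : Int) = ((W : Nat) : Int) + 1 by push_cast; ring]
      rw [PySem.List.pyRange_one_succ_right (by omega), List.foldl_append, List.foldl_cons,
        List.foldl_nil]
      set r := (PySem.List.pyRange 1 ((W : Nat) : Int) 1).foldl
          (fun c i => PySem.List.pySetD c i
            (PySem.List.pyGetD c i 0 + PySem.List.pyGetD c (i - 1) 0)) c with hr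
      have hWlt : W < 10 := by omega
      have h1 : PySem.List.pyGetD r ((W : Nat) : Int) 0 = c.getD W 0 := by
        rw [PySem.List.pyGetD_natCast, hget W hWlt, if_neg (by omega)]
      have h2 : PySem.List.pyGetD r (((W : Nat) : Int) - 1) 0
          = ∑ u ∈ Finset.range W, c.getD u 0 := by
        rw [show ((W : Nat) : Int) - 1 = ((W - 1 : Nat) : Int) by omega, PySem.List.pyGetD_natCast]
        rw [hget (W - 1) (by omega), if_pos (by omega), show W - 1 + 1 = W by omega]
      rw [h1, h2, PySem.List.pySetD_natCast]
      refine ⟨by simp [hlen], fun k hk => ?_⟩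
      rw [getD_set]
      by_cases hkW : k = W
      · subst hkW
        rw [if_pos ⟨rfl, by omega⟩, if_pos (by omega), Finset.sum_range_succ]
        ring
      · rw [if_neg (fun h => hkW h.1), hget k hk]
        by_cases h : k < W
        · rw [if_pos h, if_pos (by omega)]
        · rw [if_neg h, if_neg (by omega)]

-- ----- loop 3: backward scatter into sorted position -----
def step3 (L : List PyVal) (st : List Int × List PyVal) (i : Int) : List Int × List PyVal :=
  let v := cellInt (PySem.List.pyGetD L i (PyVal.i 0))
  let c' := PySem.List.pySetD st.1 v (PySem.List.pyGetD st.1 v 0 - 1)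
  (c', PySem.List.pySetD st.2 (PySem.List.pyGetD c' v 0) (PyVal.i v))

lemma loop3_spec (vs : List Int) (rest : List PyVal)
    (hall : ∀ x ∈ vs, 0 ≤ x ∧ x < 10)
    (counts : List Int) (arr : List PyVal)
    (hclen : counts.length = 10)
    (hcinit : ∀ k : Nat, k < 10 → counts.getD k 0 = ((SN vs (k + 1) : Nat) : Int))
    (halen : arr.length = vs.length) :
    ∀ (d m : Nat), m + d = vs.length →
      (((PySem.List.pyRange ((m : Nat) : Int) ((vs.length : Nat) : Int)).foldr
          (fun i st => step3 (vs.map PyVal.i ++ rest) st i) (counts, arr)).1.length = 10) ∧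
      (∀ k : Nat, k < 10 →
        ((PySem.List.pyRange ((m : Nat) : Int) ((vs.length : Nat) : Int)).foldr
          (fun i st => step3 (vs.map PyVal.i ++ rest) st i) (counts, arr)).1.getD k 0
        = ((SN vs k : Nat) : Int) + (((vs.take m).count ((k : Nat) : Int) : Nat) : Int)) ∧
      (((PySem.List.pyRange ((m : Nat) : Int) ((vs.length : Nat) : Int)).foldr
          (fun i st => step3 (vs.map PyVal.i ++ rest) st i) (counts, arr)).2.length = vs.length) ∧
      (∀ v' : Nat, v' < 10 → ∀ j : Nat,
        (vs.take m).count ((v' : Nat) : Int) ≤ j → j < cntF vs v' →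
        ((PySem.List.pyRange ((m : Nat) : Int) ((vs.length : Nat) : Int)).foldr
          (fun i st => step3 (vs.map PyVal.i ++ rest) st i) (counts, arr)).2[SN vs v' + j]?
          = some (PyVal.i ((v' : Nat) : Int))) := by
  intro d
  induction d with
  | zero =>
    intro m hm
    have hm' : m = vs.length := by omega
    subst hm'
    rw [PySem.List.pyRange_one_eq_nil (by omega), List.foldr_nil]
    refine ⟨hclen, ?_, halen, ?_⟩
    · intro k hk
      rw [hcinit k hk, List.take_length, SN_succ]
      unfold cntF
      push_cast
      ring
    · intro v' hv' j hj1 hj2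
      rw [List.take_length] at hj1
      exact absurd hj2 (by unfold cntF; omega)
  | succ d ih =>
    intro m hm
    have hmlt : m < vs.length := by omega
    obtain ⟨ihc1, ihc2, ihl, iha⟩ := ih (m + 1) (by omega)
    rw [PySem.List.pyRange_one_cons (by exact_mod_cast hmlt), List.foldr_cons]
    rw [show ((m : Nat) : Int) + 1 = ((m + 1 : Nat) : Int) by push_cast; ring]
    set R := (PySem.List.pyRange ((m + 1 : Nat) : Int) ((vs.length : Nat) : Int)).foldr
        (fun i st => step3 (vs.map PyVal.i ++ rest) st i) (counts, arr) with hR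
    -- the element read at index m
    have hv0 := (hall vs[m] (vs.getElem_mem hmlt)).1
    have hv10 := (hall vs[m] (vs.getElem_mem hmlt)).2
    have hvcast : ((vs[m].toNat : Nat) : Int) = vs[m] := Int.toNat_of_nonneg hv0
    have hvn10 : vs[m].toNat < 10 := by omega
    have hread : PySem.List.pyGetD (vs.map PyVal.i ++ rest) ((m : Nat) : Int) (PyVal.i 0)
        = PyVal.i vs[m] := by
      rw [PySem.List.pyGetD_natCast, List.getD_eq_getElem?_getD,
        List.getElem?_append_left (by simpa using hmlt), List.getElem?_map]
      simp [List.getElem?_eq_getElem hmlt]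
    -- take (m+1) facts
    have htake : vs.take (m + 1) = vs.take m ++ [vs[m]] := by
      rw [List.take_add_one]
      simp [List.getElem?_eq_getElem hmlt]
    have hcv : (vs.take (m + 1)).count vs[m] = (vs.take m).count vs[m] + 1 := by
      rw [htake, List.count_append]
      simp
    have hcne : ∀ a : Int, a ≠ vs[m] → (vs.take (m + 1)).count a = (vs.take m).count a := by
      intro a ha
      rw [htake, List.count_append]
      have : (vs[m] == a) = false := by simp only [beq_eq_false_iff_ne, ne_eq]; exact fun h => ha h.symm
      simp [List.count_singleton, this]
    have hcntlt : (vs.take m).count vs[m] < vs.count vs[m] := by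
      have hle : (vs.take (m + 1)).count vs[m] ≤ vs.count vs[m] :=
        (List.take_sublist _ _).count_le _
      omega
    -- the counts list after the decrement
    have hC'len : (PySem.List.pySetD R.1 vs[m] (PySem.List.pyGetD R.1 vs[m] 0 - 1)).length = 10 := by
      rw [PySem.List.length_pySetD, ihc1]
    have hC'getD : ∀ k : Nat, k < 10 →
        (PySem.List.pySetD R.1 vs[m] (PySem.List.pyGetD R.1 vs[m] 0 - 1)).getD k 0
        = ((SN vs k : Nat) : Int) + (((vs.take m).count ((k : Nat) : Int) : Nat) : Int) := by
      intro k hk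
      rw [← hvcast, PySem.List.pySetD_natCast, PySem.List.pyGetD_natCast, getD_set]
      by_cases hkv : k = vs[m].toNat
      · subst hkv
        rw [if_pos ⟨rfl, by omega⟩, ihc2 _ hvn10, hvcast, hcv]
        push_cast
        ring
      · rw [if_neg (fun h => hkv h.1), ihc2 k hk, hcne _ (by rw [← hvcast]; exact_mod_cast hkv)]
    -- the write position
    have hwrite : PySem.List.pyGetD
        (PySem.List.pySetD R.1 vs[m] (PySem.List.pyGetD R.1 vs[m] 0 - 1)) vs[m] 0
        = (((SN vs vs[m].toNat + (vs.take m).count vs[m] : Nat) : Nat) : Int) := by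
      rw [show (PySem.List.pyGetD
          (PySem.List.pySetD R.1 vs[m] (PySem.List.pyGetD R.1 vs[m] 0 - 1)) vs[m] 0)
          = (PySem.List.pySetD R.1 vs[m] (PySem.List.pyGetD R.1 vs[m] 0 - 1)).getD vs[m].toNat 0 by
        rw [← hvcast, PySem.List.pyGetD_natCast, Int.toNat_natCast]]
      rw [hC'getD _ hvn10, hvcast]
      push_cast
      ring
    have hpn : SN vs vs[m].toNat + (vs.take m).count vs[m] < vs.length := by
      have h1 : SN vs (vs[m].toNat + 1) ≤ SN vs 10 := SN_mono vs (by omega)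
      have h2 : SN vs 10 = vs.length := SN_total vs hall
      have h3 : SN vs (vs[m].toNat + 1) = SN vs vs[m].toNat + cntF vs vs[m].toNat := SN_succ _ _
      have h4 : cntF vs vs[m].toNat = vs.count vs[m] := by unfold cntF; rw [hvcast]
      omega
    -- now put the step together
    simp only [step3, hread]
    have hcell : cellInt (PyVal.i vs[m]) = vs[m] := rfl
    rw [hcell, hwrite]
    rw [PySem.List.pySetD_natCast]
    refine ⟨hC'len, hC'getD, by rw [List.length_set, ihl], ?_⟩
    intro v' hv' j hj1 hj2
    by_cases hveq : v' = vs[m].toNat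
    · subst hveq
      by_cases hjeq : j = (vs.take m).count vs[m]
      · subst hjeq
        rw [hvcast] at hj1 ⊢
        rw [List.getElem?_set_self (by rw [ihl]; exact hpn)]
      · have hj1' : (vs.take (m + 1)).count ((vs[m].toNat : Nat) : Int) ≤ j := by
          rw [hvcast, hcv]
          rw [hvcast] at hj1
          omega
        rw [List.getElem?_set_ne (by omega)]
        exact iha _ hv' j hj1' hj2
    · have hcast_ne : ((v' : Nat) : Int) ≠ vs[m] := by
        rw [← hvcast]
        exact_mod_cast hveq
      have hq1 : SN vs v' + j < SN vs (v' + 1) := by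
        have := SN_succ vs v'
        omega
      have hp1 : SN vs vs[m].toNat + (vs.take m).count vs[m] < SN vs (vs[m].toNat + 1) := by
        have h3 := SN_succ vs vs[m].toNat
        have h4 : cntF vs vs[m].toNat = vs.count vs[m] := by unfold cntF; rw [hvcast]
        omega
      have hne : SN vs vs[m].toNat + (vs.take m).count vs[m] ≠ SN vs v' + j := by
        rcases Nat.lt_or_ge v' vs[m].toNat with h | h
        · have := SN_mono vs (show v' + 1 ≤ vs[m].toNat by omega)
          omega
        · have h' : vs[m].toNat < v' := by omega
          have := SN_mono vs (show vs[m].toNat + 1 ≤ v' by omega)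
          omega
      rw [List.getElem?_set_ne hne]
      exact iha v' hv' j (by rw [← hcne _ hcast_ne] at hj1; exact hj1) hj2

-- ----- the scattered array is the canonical sorted list -----
lemma arr_eq_canon (vs : List Int) (hall : ∀ x ∈ vs, 0 ≤ x ∧ x < 10)
    (arr : List PyVal) (hlen : arr.length = vs.length)
    (h : ∀ v : Nat, v < 10 → ∀ j : Nat, j < cntF vs v →
      arr[SN vs v + j]? = some (PyVal.i ((v : Nat) : Int))) :
    arr = (canon vs 10).map PyVal.i := by
  apply List.ext_getElem?
  intro p
  by_cases hp : p < vs.length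
  · obtain ⟨v, hv, j, hj, rfl⟩ := cover vs 10 p (by rw [SN_total vs hall]; exact hp)
    rw [h v hv j hj, List.getElem?_map, getElem?_canon vs hv hj]
    rfl
  · rw [List.getElem?_eq_none (by omega), List.getElem?_eq_none (by
      rw [List.length_map, length_canon, SN_total vs hall]; omega)]

-- ----- loop 4: value-to-word conversion -----
lemma fold_s (t : List (String × Int)) (w : String) :
    t.foldl (fun c kv => if c = PyVal.i kv.2 then PyVal.s kv.1 else c) (PyVal.s w)
    = PyVal.s w := by
  induction t with
  | nil => rfl
  | cons kv r ih => simp [ih]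

lemma inner_conv : ∀ (items : List (String × Int)) (sl : List PyVal) (i : Nat), i < sl.length →
    items.foldl (fun sl kv =>
      if PySem.List.pyGetD sl ((i : Nat) : Int) (PyVal.i 0) = PyVal.i kv.2
      then PySem.List.pySetD sl ((i : Nat) : Int) (PyVal.s kv.1) else sl) sl
    = PySem.List.pySetD sl ((i : Nat) : Int)
        (items.foldl (fun c kv => if c = PyVal.i kv.2 then PyVal.s kv.1 else c)
          (PySem.List.pyGetD sl ((i : Nat) : Int) (PyVal.i 0))) := by
  intro items
  induction items with
  | nil =>
    intro sl i hi
    rw [List.foldl_nil, List.foldl_nil, PySem.List.pySetD_natCast, PySem.List.pyGetD_natCast,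
      List.getD_eq_getElem?_getD, List.getElem?_eq_getElem hi]
    simp [List.set_getElem_self]
  | cons kv t ih =>
    intro sl i hi
    simp only [List.foldl_cons]
    by_cases hc : PySem.List.pyGetD sl ((i : Nat) : Int) (PyVal.i 0) = PyVal.i kv.2
    · rw [if_pos hc, if_pos hc]
      have hlen' : (PySem.List.pySetD sl ((i : Nat) : Int) (PyVal.s kv.1)).length = sl.length := by
        rw [PySem.List.length_pySetD]
      rw [ih _ i (by omega)]
      have hg : PySem.List.pyGetD (PySem.List.pySetD sl ((i : Nat) : Int) (PyVal.s kv.1))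
          ((i : Nat) : Int) (PyVal.i 0) = PyVal.s kv.1 := by
        rw [PySem.List.pySetD_natCast, PySem.List.pyGetD_natCast, getD_set, if_pos ⟨rfl, hi⟩]
      rw [hg, fold_s]
      simp only [PySem.List.pySetD_natCast, List.set_set]
    · rw [if_neg hc, if_neg hc, ih sl i hi]

lemma loop4_spec :
    ∀ (todo done : List PyVal) (a b : Int), a = (done.length : Int) → b = a + (todo.length : Int) →
      (PySem.List.pyRange a b).foldl
        (fun sl i => langDict.items.foldl (fun sl kv =>
          if PySem.List.pyGetD sl i (PyVal.i 0) = PyVal.i kv.2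
          then PySem.List.pySetD sl i (PyVal.s kv.1) else sl) sl)
        (done ++ todo)
      = done ++ todo.map conv := by
  intro todo
  induction todo with
  | nil =>
    intro done a b ha hb
    simp only [List.length_nil, Nat.cast_zero, add_zero] at hb
    rw [PySem.List.pyRange_one_eq_nil (by omega)]
    simp
  | cons c t ih =>
    intro done a b ha hb
    subst ha
    rw [PySem.List.pyRange_one_cons (by push_cast [hb, List.length_cons]; omega)]
    simp only [List.foldl_cons]
    rw [inner_conv _ _ done.length (by simp)]
    have hg : PySem.List.pyGetD (done ++ c :: t) ((done.length : Nat) : Int) (PyVal.i 0) = c := by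
      rw [PySem.List.pyGetD_natCast, getD_append_length]
    rw [hg, PySem.List.pySetD_natCast, set_append_length]
    have hcv : List.foldl (fun c kv => if c = PyVal.i kv.2 then PyVal.s kv.1 else c) c
        langDict.items = conv c := rfl
    rw [hcv, show done ++ (conv c) :: t = (done ++ [conv c]) ++ t by simp]
    rw [ih (done ++ [conv c]) ((done.length : Int) + 1) b (by simp) (by
      push_cast [hb, List.length_cons]; omega)]
    simp [conv]

-- ----- concrete value facts -----
lemma toVal_range (s : String) (h : s ∈ langWords) : 0 ≤ toVal s ∧ toVal s < 10 := by
  fin_cases h <;> decide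

lemma conv_i (v : Nat) (hv : v < 10) :
    cellStr (conv (PyVal.i ((v : Nat) : Int))) = wordOf v := by
  interval_cases v <;> decide

lemma inv_getD (v : Nat) (hv : v < 10) : invDict.getD ((v : Nat) : Int) "" = wordOf v := by
  interval_cases v <;> decide

-- ----- B-side: the converted prefix -----
lemma map_getD_take (lst : List String) (m : Nat) (hm : m ≤ lst.length) :
    (PySem.List.pyRange 0 ((m : Nat) : Int)).map (fun i => PySem.List.pyGetD lst i "")
    = lst.take m := by
  apply List.ext_getElem?
  intro p
  by_cases hp : p < m
  · rw [PySem.List.getElem?_map_pyRange_zero _ _ _ hp, List.getElem?_take_of_lt hp]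
    rw [PySem.List.pyGetD_natCast, List.getD_eq_getElem?_getD,
      List.getElem?_eq_getElem (by omega)]
    simp
  · rw [List.getElem?_eq_none (by simp [PySem.List.length_pyRange_one]; omega),
      List.getElem?_eq_none (by simp; omega)]

-- ===== VERDICT (by name: the statement is the Claim_ definition above) =====
theorem gns_spec : Claim_equal_gns := by
  intro n lst _hdom hpre
  obtain ⟨hnle, hwords⟩ := hpre
  unfold Spec_gns
  by_cases hn0 : 0 ≤ n
  case neg =>
    -- n < 0: every range is empty and both sides return []
    have hneg : n < 0 := by omega
    simp only [gns, gns_alt]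
    rw [PySem.List.pyRange_one_eq_nil (by omega), PySem.List.pyRange_neg_one_eq_nil (by omega)]
    simp only [Int.toNat_of_nonpos hneg.le, List.foldl_nil, List.replicate_zero]
    rw [show (PySem.List.sorted ([] : List Int) (fun x => x) false) = [] from rfl]
    rfl
  have hn : ((n.toNat : Nat) : Int) = n := Int.toNat_of_nonneg hn0
  have hmle : n.toNat ≤ lst.length := by omega
  have hall : ∀ x ∈ (lst.take n.toNat).map toVal, 0 ≤ x ∧ x < 10 := by
    intro x hx
    obtain ⟨s, hs, rfl⟩ := List.mem_map.1 hx
    exact toVal_range s (hwords s hs)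
  have hvslen : ((lst.take n.toNat).map toVal).length = n.toNat := by
    rw [List.length_map, List.length_take]
    omega
  have hBside : gns_alt n lst
      = (canon ((lst.take n.toNat).map toVal) 10).map (fun x : Int => wordOf x.toNat) := by
    simp only [gns_alt]
    rw [PySem.List.foldl_append_singleton_eq_map
      (fun i => langDict.getD (PySem.List.pyGetD lst i "") 0) _ []]
    rw [List.nil_append, ← hn]
    rw [show (fun i => langDict.getD (PySem.List.pyGetD lst i "") 0)
        = (toVal ∘ fun i => PySem.List.pyGetD lst i "") from rfl]
    rw [← List.map_map, map_getD_take lst n.toNat hmle]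
    rw [PySem.List.sorted_id_eq_of_perm_of_pairwise _ _
      (perm_canon _ hall) (pairwise_canon _ 10)]
    apply List.map_congr_left
    intro x hx
    obtain ⟨u, hu, rfl⟩ := mem_canon _ 10 x hx
    rw [inv_getD u hu, Int.toNat_natCast]
  rw [hBside]
  simp only [gns]
  rw [← hn]
  simp only [Int.toNat_natCast]
  have hsplit : List.map PyVal.s lst
      = List.map PyVal.i ([] : List Int)
        ++ List.map PyVal.s (lst.take n.toNat ++ lst.drop n.toNat) := by
    rw [List.take_append_drop]
    rfl
  rw [hsplit, loop1_spec (lst.drop n.toNat) (lst.take n.toNat) [] (List.replicate 10 0)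
    0 ((n.toNat : Nat) : Int) (by simp) (by push_cast [List.length_take]; omega)]
  simp only [List.nil_append]
  set vs := List.map toVal (List.take n.toNat lst) with hvs
  -- loop 2 facts
  obtain ⟨hlen2, hget2⟩ := loop2_spec 10 (le_refl _) (applyCounts (List.replicate 10 0) vs)
    (by rw [applyCounts_length]; simp)
  rw [show ((10 : Nat) : Int) = (10 : Int) by norm_num] at hlen2 hget2
  have hcinit : ∀ k : Nat, k < 10 →
      (List.foldl (fun c i => PySem.List.pySetD c i
          (PySem.List.pyGetD c i 0 + PySem.List.pyGetD c (i - 1) 0))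
        (applyCounts (List.replicate 10 0) vs) (PySem.List.pyRange 1 10)).getD k 0
      = ((SN vs (k + 1) : Nat) : Int) := by
    intro k hk
    rw [hget2 k hk, if_pos hk]
    have hsum : ∀ u ∈ Finset.range (k + 1),
        (applyCounts (List.replicate 10 0) vs).getD u 0 = ((cntF vs u : Nat) : Int) := by
      intro u hu
      rw [Finset.mem_range] at hu
      rw [applyCounts_getD vs _ (by simp) hall u (by omega), List.getD_replicate _ (by omega)]
      simp [cntF]
    rw [Finset.sum_congr rfl hsum, SN, Nat.cast_sum]
  -- loop 3
  obtain ⟨-, -, hlen3, harr3⟩ := loop3_spec vs (List.map PyVal.s (lst.drop n.toNat)) hall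
    (List.foldl (fun c i => PySem.List.pySetD c i
        (PySem.List.pyGetD c i 0 + PySem.List.pyGetD c (i - 1) 0))
      (applyCounts (List.replicate 10 0) vs) (PySem.List.pyRange 1 10))
    (List.replicate n.toNat (PyVal.i 0)) hlen2 hcinit (by simp [hvslen])
    vs.length 0 (by omega)
  have harr := arr_eq_canon vs hall _ hlen3
    (fun v hv j hj => harr3 v hv j (by simp) hj)
  rw [show ((0 : Nat) : Int) = (0 : Int) by norm_num,
    show ((vs.length : Nat) : Int) = ((n.toNat : Nat) : Int) by rw [hvslen]] at harr
  simp only [step3] at harr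
  rw [← List.foldl_reverse] at harr
  rw [PySem.List.pyRange_neg_one_eq_reverse,
    show (-1 : Int) + 1 = 0 by norm_num,
    show ((n.toNat : Nat) : Int) - 1 + 1 = ((n.toNat : Nat) : Int) by ring]
  rw [harr]
  -- loop 4
  rw [show (canon vs 10).map PyVal.i = [] ++ (canon vs 10).map PyVal.i from rfl]
  rw [loop4_spec ((canon vs 10).map PyVal.i) [] 0 ((n.toNat : Nat) : Int) (by simp)
    (by rw [List.length_map, length_canon, SN_total vs hall, hvslen]; simp)]
  simp only [List.nil_append, List.map_map]
  apply List.map_congr_left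
  intro x hx
  obtain ⟨u, hu, rfl⟩ := mem_canon vs 10 x hx
  simp only [Function.comp]
  rw [conv_i u hu, Int.toNat_natCast]
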